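-- pv_equiv track=rewrite | github.com/nisal932/natural-disasters-news-data-monitoring-and-scraping | main.py | keywords_validator
-- ===== SOURCE A (Python) =====
-- def keywords_validator(keyword_list, news_list): # Targeted keyword list , Scraped news list
--     news_contain_target_keywords = {} # Dic for save the news wich contain targeted keywords
--     for i in keyword_list:
--         news_contain_target_keywords[i] = []
--         for j in news_list:
--             news_text = news_list[j]
--             if i.lower() in news_text.lower(): # 1. Convert all news and targted keywords to simple letters to avoid case sensitivity. 2. check the availability of targeted keywords
--                 (news_contain_target_keywords[i]).append(j)
--     return news_contain_target_keywords # return news wich contains targeted keywords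
-- ===== SOURCE B (Python) =====
-- def keywords_validator(keyword_list, news_list):
--     # Stage 1: one pass over the news builds, per item, an n-gram index:
--     # the set of ALL substrings of the lowered text whose length is one of the
--     # needle lengths.  Stage 2 answers every keyword by a set-membership test,
--     # so no per-keyword substring scan over the texts remains.
--     lens = {len(i.lower()) for i in keyword_list}
--     index = []
--     for j, text in news_list.items():
--         t = text.lower()
--         grams = {t[p:p + n] for n in lens for p in range(len(t) - n + 1)}
--         index.append((j, grams))
--     return {i: [j for j, grams in index if i.lower() in grams] for i in keyword_list}
-- ===== Notes on version B (the rewrite author's own statement) =====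
-- stated objective: alternative
-- what changed: B replaces A's per-keyword substring scan over every text with a two-stage index: one pass lowers each text once and builds a hash set of all its substrings of the needle lengths (an n-gram index), and each keyword's bucket is then a pure set-membership filter over that index; A's inner scan and per-item dict lookup news_list[j] disappear.
import Mathlib
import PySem

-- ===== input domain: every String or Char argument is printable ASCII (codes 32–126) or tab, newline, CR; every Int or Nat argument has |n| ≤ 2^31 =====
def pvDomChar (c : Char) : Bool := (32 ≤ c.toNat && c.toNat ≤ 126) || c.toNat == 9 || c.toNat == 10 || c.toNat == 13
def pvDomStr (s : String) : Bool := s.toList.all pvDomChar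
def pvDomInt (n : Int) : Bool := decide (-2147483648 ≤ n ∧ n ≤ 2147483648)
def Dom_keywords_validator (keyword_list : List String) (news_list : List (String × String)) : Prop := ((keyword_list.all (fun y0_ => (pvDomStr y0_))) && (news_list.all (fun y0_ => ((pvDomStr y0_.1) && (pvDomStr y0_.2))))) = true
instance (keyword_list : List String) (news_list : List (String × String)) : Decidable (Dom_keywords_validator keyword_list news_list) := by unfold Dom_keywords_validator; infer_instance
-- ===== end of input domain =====

-- B answers every keyword by membership in a per-text n-gram index (all substrings of the needle
-- lengths, built in one pass) instead of A's per-keyword substring scan; same return value.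

-- ===== PORT A =====
-- A iterates keywords; for each keyword it walks the news dict's keys and looks the text up by
-- key (news_list[j], first-match lookup; j is always a key, so the "" default is never used), and
-- appends j when the lowered keyword occurs in the lowered text (the key i was just inserted,
-- so modify's [] default is never used).
def keywords_validator (keyword_list : List String) (news_list : List (String × String)) : List (String × List String) :=
  (keyword_list.foldl (fun d i =>
    news_list.foldl (fun d jp =>
      let news_text := (PySem.Dict.mk news_list).getD jp.1 ""
      if PySem.Str.isIn (PySem.Str.lower i) (PySem.Str.lower news_text)
      then PySem.Dict.modify d i [] (fun l => l ++ [jp.1])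
      else d)
      (PySem.Dict.insert d i []))
    PySem.Dict.empty).items

-- ===== PORT B =====
-- grams = {t[p:p+n] for n in lens for p in range(len(t)-n+1)}  (strings as code-point lists)
def pvGramsOf (lens : PySem.Set Int) (t : List Char) : PySem.Set (List Char) :=
  PySem.Set.ofList (lens.flatMap (fun n =>
    (PySem.List.pyRange 0 ((t.length : Int) - n + 1) 1).map (fun p =>
      PySem.Chars.slice t (some p) (some (p + n)))))

-- B: stage 1 builds the per-item n-gram index in one pass over the news; stage 2 is the dict
-- comprehension {i: [j for j, grams in index if i.lower() in grams] for i in keyword_list}.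
def keywords_validator_alt (keyword_list : List String) (news_list : List (String × String)) : List (String × List String) :=
  let lens : PySem.Set Int :=
    PySem.Set.ofList (keyword_list.map (fun i => ((PySem.Chars.lower i.toList).length : Int)))
  let index : List (String × PySem.Set (List Char)) :=
    news_list.foldl (fun acc jt =>
      acc ++ [(jt.1, pvGramsOf lens (PySem.Chars.lower jt.2.toList))]) []
  (keyword_list.foldl (fun d i =>
    d.insert i ((index.filter (fun je => je.2.contains (PySem.Chars.lower i.toList))).map Prod.fst))
    PySem.Dict.empty).items

-- ===== PRECONDITION & SPEC =====
-- Pre_ requires the news keys to be distinct: a Python dict cannot carry duplicate keys, so this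
-- excludes no input the Python A ever receives; it rules out only assoc lists where A's re-lookup
-- news_list[j] (first match) would disagree with the pair's own text that B reads.
def Pre_keywords_validator (keyword_list : List String) (news_list : List (String × String)) : Prop :=
  (news_list.map Prod.fst).Nodup
instance (keyword_list : List String) (news_list : List (String × String)) : Decidable (Pre_keywords_validator keyword_list news_list) := by unfold Pre_keywords_validator; infer_instance
def pvWitness_keywords_validator : List String × (List (String × String)) :=
  (["Flood", "storm"], [("u1", "Flood warning issued"), ("u2", "sunny day")])
def Spec_keywords_validator (keyword_list : List String) (news_list : List (String × String)) (out : List (String × List String)) : Prop := out = keywords_validator_alt keyword_list news_list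
instance (keyword_list : List String) (news_list : List (String × String)) (out : List (String × List String)) : Decidable (Spec_keywords_validator keyword_list news_list out) := by unfold Spec_keywords_validator; infer_instance

-- ===== CLAIM (what is proved, stated in full; the proofs are below) =====
def Claim_equal_keywords_validator : Prop := ∀ (keyword_list : List String) (news_list : List (String × String)), Dom_keywords_validator keyword_list news_list → Pre_keywords_validator keyword_list news_list → Spec_keywords_validator keyword_list news_list (keywords_validator keyword_list news_list)

-- ===== LEMMAS AND PROOFS =====

-- the common value: for each keyword, the keys of the news items whose lowered text contains it
def pvHits (news_list : List (String × String)) (i : String) : List String :=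
  (news_list.filter (fun p => PySem.Str.isIn (PySem.Str.lower i) (PySem.Str.lower p.2))).map Prod.fst

-- modify right after inserting the same key = insert the updated value
theorem modify_insert_self {κ ν : Type} [BEq κ] [LawfulBEq κ] (d : PySem.Dict κ ν) (k : κ) (a d0 : ν) (f : ν → ν) :
    (d.insert k a).modify k d0 f = d.insert k (f a) := by
  simp [PySem.Dict.modify, PySem.Dict.getD_insert_self, PySem.Dict.insert_insert_self]

-- A's inner loop: conditional appends at one freshly-inserted key collapse to one insert
theorem foldl_modify_filter {κ : Type} [BEq κ] [LawfulBEq κ] {α : Type}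
    (l : List α) (c : α → Bool) (g : α → κ) (d : PySem.Dict κ (List κ)) (k : κ) (a : List κ) :
    l.foldl (fun d jp => if c jp then PySem.Dict.modify d k [] (fun l => l ++ [g jp]) else d) (d.insert k a)
      = d.insert k (a ++ (l.filter c).map g) := by
  induction l generalizing a with
  | nil => simp
  | cons hd tl ih =>
    by_cases h : c hd
    · simp only [List.foldl_cons, h, if_pos, modify_insert_self, List.filter_cons_of_pos h, List.map_cons]
      rw [ih]; simp
    · simp only [List.foldl_cons, h, if_neg, List.filter_cons_of_neg, Bool.false_eq_true,
        not_false_iff, ih]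

-- a fold of inserts whose value depends only on the key: lookups outside the key list are untouched
theorem getD_foldl_insert_not_mem {κ ν : Type} [BEq κ] [LawfulBEq κ]
    (ks : List κ) (F : κ → ν) (d : PySem.Dict κ ν) (k : κ) (d0 : ν) (h : k ∉ ks) :
    (ks.foldl (fun d i => d.insert i (F i)) d).getD k d0 = d.getD k d0 := by
  induction ks generalizing d with
  | nil => rfl
  | cons i tl ih =>
    simp only [List.mem_cons, not_or] at h
    simp only [List.foldl_cons, ih _ h.2, PySem.Dict.getD_insert_of_ne _ _ _ h.1]

-- … and lookups inside the key list give the key's value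
theorem getD_foldl_insert_mem {κ ν : Type} [BEq κ] [LawfulBEq κ]
    (ks : List κ) (F : κ → ν) (d : PySem.Dict κ ν) (k : κ) (d0 : ν) (h : k ∈ ks) :
    (ks.foldl (fun d i => d.insert i (F i)) d).getD k d0 = F k := by
  induction ks generalizing d with
  | nil => cases h
  | cons i tl ih =>
    by_cases htl : k ∈ tl
    · simp only [List.foldl_cons, ih _ htl]
    · have hk : k = i := by rcases List.mem_cons.mp h with h | h; exact h; exact absurd h htl
      subst hk
      simp only [List.foldl_cons, getD_foldl_insert_not_mem _ _ _ _ _ htl, PySem.Dict.getD_insert_self]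

-- the items of such a fold from the empty dict: deduped keys paired with their values
theorem items_foldl_insert_fun {κ ν : Type} [BEq κ] [LawfulBEq κ] (ks : List κ) (F : κ → ν) (d0 : ν) :
    (ks.foldl (fun d i => d.insert i (F i)) PySem.Dict.empty).items
      = (PySem.List.dedup ks).map (fun i => (i, F i)) := by
  have hkeys : (ks.foldl (fun d i => d.insert i (F i)) PySem.Dict.empty).keys = PySem.List.dedup ks := by
    rw [PySem.Dict.keys_foldl_insert, PySem.Dict.keys_empty, PySem.List.dedup_eq_ofList]; rfl
  have hnd : (ks.foldl (fun d i => d.insert i (F i)) PySem.Dict.empty).keys.Nodup := by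
    exact PySem.Dict.nodup_keys_foldl_insert _ _ _ PySem.Dict.nodup_keys_empty
  rw [PySem.Dict.items_eq_map_keys _ hnd d0, hkeys]
  refine List.map_congr_left (fun k hk => ?_)
  rw [getD_foldl_insert_mem _ _ _ _ _ ((PySem.List.mem_dedup _ _).mp hk)]

-- A equals the canonical table (given distinct news keys)
theorem portA_eq_canon (keyword_list : List String) (news_list : List (String × String))
    (hnd : (news_list.map Prod.fst).Nodup) :
    keywords_validator keyword_list news_list
      = (PySem.List.dedup keyword_list).map (fun i => (i, pvHits news_list i)) := by
  unfold keywords_validator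
  have hlook : ∀ jp ∈ news_list, (PySem.Dict.mk news_list).getD jp.1 "" = jp.2 := by
    intro jp hjp
    exact PySem.Dict.getD_of_mem_items (d := PySem.Dict.mk news_list) (k := jp.1) (v := jp.2) hjp hnd ""
  have hstep : ∀ (d : PySem.Dict String (List String)) (i : String),
      news_list.foldl (fun d jp =>
        let news_text := (PySem.Dict.mk news_list).getD jp.1 ""
        if PySem.Str.isIn (PySem.Str.lower i) (PySem.Str.lower news_text)
        then PySem.Dict.modify d i [] (fun l => l ++ [jp.1]) else d) (d.insert i [])
      = d.insert i (pvHits news_list i) := by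
    intro d i
    rw [PySem.List.foldl_congr_mem _ _
      (fun d jp => if PySem.Str.isIn (PySem.Str.lower i) (PySem.Str.lower jp.2)
        then PySem.Dict.modify d i [] (fun l => l ++ [jp.1]) else d) _
      (by intro acc jp hjp; simp only [hlook jp hjp])]
    rw [foldl_modify_filter news_list
      (fun jp => PySem.Str.isIn (PySem.Str.lower i) (PySem.Str.lower jp.2)) Prod.fst d i []]
    rfl
  rw [PySem.List.foldl_congr_mem _ _ (fun d i => d.insert i (pvHits news_list i)) _
    (by intro acc i _; exact hstep acc i)]
  exact items_foldl_insert_fun _ _ []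

-- membership in the n-gram index is exactly substring containment (for a needle whose length is indexed)
theorem contains_gramsOf (lens : PySem.Set Int) (t w : List Char)
    (hnn : ∀ n ∈ lens, 0 ≤ n) (hw : ((w.length : Int)) ∈ lens) :
    (pvGramsOf lens t).contains w = PySem.Chars.isIn w t := by
  apply Bool.coe_iff_coe.mp
  rw [PySem.Chars.isIn_iff_infix]
  unfold pvGramsOf
  simp only [PySem.Set.contains, List.contains_iff_mem,
    PySem.Set.mem_ofList, List.mem_flatMap, List.mem_map]
  constructor
  · rintro ⟨n, hn, p, hp, rfl⟩
    have hb := (PySem.List.mem_pyRange_one.mp hp)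
    have h0n := hnn n hn
    simp only [PySem.Chars.slice] at *
    rw [PySem.List.slice_toNat _ hb.1 (by omega : (0:ℤ) ≤ p + n)]
    exact ((List.take_prefix _ _).isInfix).trans (t.drop_suffix p.toNat).isInfix
  · rintro ⟨s, u, rfl⟩
    refine ⟨(w.length : Int), hw, (s.length : Int), ?_, ?_⟩
    · rw [PySem.List.mem_pyRange_one]
      refine ⟨by positivity, ?_⟩
      simp [List.length_append]; omega
    · simp only [PySem.Chars.slice]
      rw [PySem.List.slice_natCast_add]
      simp

-- B equals the canonical table
theorem portB_eq_canon (keyword_list : List String) (news_list : List (String × String)) :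
    keywords_validator_alt keyword_list news_list
      = (PySem.List.dedup keyword_list).map (fun i => (i, pvHits news_list i)) := by
  unfold keywords_validator_alt
  dsimp only
  rw [PySem.List.foldl_append_singleton_eq_map]
  rw [items_foldl_insert_fun _ _ []]
  refine List.map_congr_left (fun i hi => ?_)
  have hik : i ∈ keyword_list := (PySem.List.mem_dedup _ _).mp hi
  have hnn : ∀ n ∈ PySem.Set.ofList (keyword_list.map (fun i => ((PySem.Chars.lower i.toList).length : Int))), 0 ≤ n := by
    intro n hn
    rcases List.mem_map.mp ((PySem.Set.mem_ofList _ _).mp hn) with ⟨x, _, rfl⟩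
    positivity
  have hw : (((PySem.Chars.lower i.toList).length : Int)) ∈ PySem.Set.ofList (keyword_list.map (fun i => ((PySem.Chars.lower i.toList).length : Int))) := by
    exact (PySem.Set.mem_ofList _ _).mpr (List.mem_map.mpr ⟨i, hik, rfl⟩)
  refine congrArg (fun x => (i, x)) ?_
  rw [List.nil_append, List.filter_map, List.map_map]
  unfold pvHits
  rw [List.filter_congr (fun jt _ => ?_), List.map_congr_left (fun jt _ => ?_)]
  · simp [Function.comp]
  · simp only [Function.comp]
    rw [contains_gramsOf _ _ _ hnn hw]
    simp

-- ===== VERDICT (by name: the statement is the Claim_ definition above) =====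
theorem keywords_validator_spec : Claim_equal_keywords_validator := by
  intro keyword_list news_list _ hpre
  unfold Spec_keywords_validator
  rw [portA_eq_canon _ _ hpre, portB_eq_canon]
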